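-- pv_equiv track=rewrite | github.com/agentemasterescala-web/Comunidad-VIP | datos/procesados/escribir_a_ghl.py | parse_historial
-- ===== SOURCE A (Python) =====
-- def parse_historial(s):
--     """Lee 'Mar'26:Platino | Feb'26:Bronce | ...' a [(mes, nivel), ...].
--     Solo lee la primera línea para tolerar entradas legacy en líneas siguientes."""
--     if not s: return []
--     first = s.split("\n")[0].strip()
--     out = []
--     for p in [x.strip() for x in first.split("|") if x.strip()]:
--         if ":" in p:
--             mes, niv = p.split(":", 1)
--             out.append((mes.strip(), niv.strip()))
--     return out
-- ===== SOURCE B (Python) =====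
-- import re
--
-- # one (key, value) pair per '|'-segment that contains a ':'; the anchor
-- # (start of line or just after a '|') pins every attempt to a segment start
-- _PAIR = re.compile(r'(?:^|(?<=\|))([^|:]*):([^|]*)')
--
-- def parse_historial(s):
--     """Lee 'Mar'26:Platino | Feb'26:Bronce | ...' a [(mes, nivel), ...].
--     Una sola pasada regex sobre la primera linea: cada pareja clave:valor
--     (la clave no contiene '|' ni ':', el valor corre hasta el proximo '|')."""
--     if not s:
--         return []
--     first = s.split("\n", 1)[0]
--     return [(m.group(1).strip(), m.group(2).strip()) for m in _PAIR.finditer(first)]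
-- ===== Notes on version B (the rewrite author's own statement) =====
-- stated objective: idiomatic
-- what changed: B replaces A's strip/split('|')/filter/split(':',1) pipeline over intermediate segment lists by a single regex pass over the first line (re.finditer of (?:^|(?<=\|))([^|:]*):([^|]*)), emitting one stripped (key, value) pair per match.
import Mathlib
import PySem

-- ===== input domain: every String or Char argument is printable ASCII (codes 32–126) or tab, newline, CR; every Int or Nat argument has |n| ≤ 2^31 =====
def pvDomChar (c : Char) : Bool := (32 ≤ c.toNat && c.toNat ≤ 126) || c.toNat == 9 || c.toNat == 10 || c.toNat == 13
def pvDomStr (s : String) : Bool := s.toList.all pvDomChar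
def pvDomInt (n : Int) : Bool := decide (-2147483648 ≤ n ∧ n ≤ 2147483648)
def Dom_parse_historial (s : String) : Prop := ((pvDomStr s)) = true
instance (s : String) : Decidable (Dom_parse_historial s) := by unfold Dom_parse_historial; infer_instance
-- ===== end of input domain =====

-- B replaces A's split/strip/split pipeline by a single regex-style scan of the first
-- line (one pass, no intermediate segment lists); equivalence is proved for ALL strings.

-- ===== PORT A =====
-- 'mes, niv = p.split(":", 1)' is matched on a two-element list; the fallback arm is
-- unreachable because ':' in p guarantees exactly two parts.
def parse_historial (s : String) : List (String × String) :=
  if s = "" then []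
  else
    -- first = s.split("\n")[0].strip()   (split() is never empty, so [0] cannot raise;
    -- headD's default is unreachable)
    let first := PySem.Chars.strip ((PySem.Chars.splitOn s.toList ['\n']).headD [])
    -- [x.strip() for x in first.split("|") if x.strip()]
    let ps := ((PySem.Chars.splitOn first ['|']).filter
                 (fun x => !(PySem.Chars.strip x).isEmpty)).map PySem.Chars.strip
    ps.foldl (fun out p =>
      if PySem.Chars.isIn [':'] p then
        match PySem.Chars.splitOnMax p [':'] 1 with
        | [mes, niv] =>
            out ++ [(String.ofList (PySem.Chars.strip mes), String.ofList (PySem.Chars.strip niv))]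
        | _ => out
      else out) []

-- ===== PORT B =====
-- Hand port of _PAIR.finditer(first) (PySem has no regex).  The anchor
-- (?:^|(?<=\|)) makes an attempt succeed only at a segment start (start of the
-- line or just after a '|'), so the scan moves from segment start to segment
-- start: group 1 is the greedy run of chars other than '|' and ':' (takeWhile),
-- then a literal ':' must follow, then group 2 is the greedy run of chars other
-- than '|'.  On a match the scan resumes at the next segment start (after the
-- '|' that ends group 2); on a failed attempt (the run hit a '|' or the end of
-- the line instead of a ':') it resumes after that '|'.  Exact for this
-- pattern: both classes are greedy and no backtracking can occur.
def pvScan : List Char → List (List Char × List Char)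
  | [] => []
  | c :: rest =>
    let g1 := (c :: rest).takeWhile (fun x => x != '|' && x != ':')
    match h2 : (c :: rest).drop g1.length with
    | d :: r2 =>
      if d = ':' then
        let g2 := r2.takeWhile (· != '|')
        (g1, g2) :: pvScan ((r2.drop g2.length).tail)
      else pvScan r2
    | [] => []
termination_by cs => cs.length
decreasing_by
  · have := congrArg List.length h2
    simp [List.length_drop] at this
    have h3 := List.length_drop (l := r2) (i := (r2.takeWhile (· != '|')).length)
    have h4 := List.length_tail (l := r2.drop (r2.takeWhile (· != '|')).length)
    simp at h3 h4 ⊢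
    omega
  · have := congrArg List.length h2
    simp [List.length_drop] at this
    simp
    omega

def parse_historial_alt (s : String) : List (String × String) :=
  if s = "" then []
  else
    -- first = s.split("\n", 1)[0]   (split() is never empty; headD's default unreachable)
    let first := (PySem.Chars.splitOnMax s.toList ['\n'] 1).headD []
    (pvScan first).map (fun m =>
      (String.ofList (PySem.Chars.strip m.1), String.ofList (PySem.Chars.strip m.2)))

-- ===== PRECONDITION & SPEC =====
def Spec_parse_historial (s : String) (out : List (String × String)) : Prop := out = parse_historial_alt s
instance (s : String) (out : List (String × String)) : Decidable (Spec_parse_historial s out) := by unfold Spec_parse_historial; infer_instance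

-- ===== CLAIM (what is proved, stated in full; the proofs are below) =====
def Claim_equal_parse_historial : Prop := ∀ (s : String), Dom_parse_historial s → Spec_parse_historial s (parse_historial s)

-- ===== LEMMAS AND PROOFS =====

-- Reference splitter: Python's s.split(c) for a one-char separator, as plain structural
-- recursion (the fueled PySem.Chars.splitOn.go is rewritten into this below).
def pvSplits (c : Char) : List Char → List (List Char)
  | [] => [[]]
  | x :: rest =>
    if x = c then [] :: pvSplits c rest
    else match pvSplits c rest with
         | s :: ss => (x :: s) :: ss
         | [] => [[x]]

-- Reference for s.split(c, 1).
def pvSplit1 (c : Char) : List Char → List (List Char)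
  | [] => [[]]
  | x :: rest =>
    if x = c then [[], rest]
    else match pvSplit1 c rest with
         | s :: ss => (x :: s) :: ss
         | [] => [[x]]

def pvPadHead (pre : List Char) : List (List Char) → List (List Char)
  | [] => []
  | s :: ss => (pre ++ s) :: ss

theorem pvSplits_ne_nil (c : Char) (cs : List Char) : pvSplits c cs ≠ [] := by
  cases cs with
  | nil => simp [pvSplits]
  | cons x rest => simp only [pvSplits]; split; · simp
                   · split <;> simp

theorem pvSplit1_ne_nil (c : Char) (cs : List Char) : pvSplit1 c cs ≠ [] := by
  cases cs with
  | nil => simp [pvSplit1]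
  | cons x rest => simp only [pvSplit1]; split; · simp
                   · split <;> simp

theorem pvPadHead_nil (L : List (List Char)) : pvPadHead [] L = L := by
  cases L <;> simp [pvPadHead]

theorem splitOn_go_spec (c : Char) (fuel : Nat) : ∀ (l cur acc : _), l.length < fuel →
    PySem.Chars.splitOn.go [c] fuel l cur acc
      = acc.reverse ++ pvPadHead cur.reverse (pvSplits c l) := by
  induction fuel with
  | zero => intro l cur acc h; omega
  | succ n ih =>
    intro l cur acc h
    cases l with
    | nil => simp [PySem.Chars.splitOn.go, pvSplits, pvPadHead]
    | cons x rest =>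
      simp only [PySem.Chars.splitOn.go, List.isPrefixOf, List.isPrefixOf_nil_left,
        Bool.and_true, List.length_cons, List.length_nil, List.drop_succ_cons, List.drop_zero,
        Nat.zero_add, List.drop_nil]
      by_cases hx : c = x
      · subst hx
        rw [if_pos (by simp), ih _ _ _ (by simpa using Nat.lt_of_succ_lt_succ h)]
        obtain ⟨s, ss, hss⟩ := List.exists_cons_of_ne_nil (pvSplits_ne_nil c rest)
        simp [pvSplits, pvPadHead, hss]
      · rw [if_neg (by simpa using hx), ih _ _ _ (by simpa using Nat.lt_of_succ_lt_succ h)]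
        obtain ⟨s, ss, hss⟩ := List.exists_cons_of_ne_nil (pvSplits_ne_nil c rest)
        simp [pvSplits, Ne.symm hx, hss, pvPadHead]

theorem splitOn_single (c : Char) (cs : List Char) :
    PySem.Chars.splitOn cs [c] = pvSplits c cs := by
  unfold PySem.Chars.splitOn
  rw [splitOn_go_spec c (cs.length + 1) cs [] [] (by omega)]
  simp [pvPadHead_nil]

theorem splitOnMax_go_zero (c : Char) (fuel : Nat) (l cur acc : _) :
    PySem.Chars.splitOnMax.go [c] fuel 0 l cur acc = acc.reverse ++ [cur.reverse ++ l] := by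
  cases fuel <;> cases l <;> simp [PySem.Chars.splitOnMax.go]

theorem splitOnMax_go_one (c : Char) (fuel : Nat) : ∀ (l cur acc : _), l.length < fuel →
    PySem.Chars.splitOnMax.go [c] fuel 1 l cur acc
      = acc.reverse ++ pvPadHead cur.reverse (pvSplit1 c l) := by
  induction fuel with
  | zero => intro l cur acc h; omega
  | succ n ih =>
    intro l cur acc h
    cases l with
    | nil => simp [PySem.Chars.splitOnMax.go, pvSplit1, pvPadHead]
    | cons x rest =>
      simp only [PySem.Chars.splitOnMax.go, List.isPrefixOf, List.isPrefixOf_nil_left,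
        Bool.and_true, List.length_cons, List.length_nil, List.drop_succ_cons, List.drop_zero,
        Nat.zero_add, List.drop_nil]
      rw [if_neg (by omega)]
      by_cases hx : c = x
      · subst hx
        rw [if_pos (by simp)]
        rw [show (1 : Nat) - 1 = 0 from rfl, splitOnMax_go_zero]
        simp [pvSplit1, pvPadHead]
      · rw [if_neg (by simpa using hx), ih _ _ _ (by simpa using Nat.lt_of_succ_lt_succ h)]
        obtain ⟨s, ss, hss⟩ := List.exists_cons_of_ne_nil (pvSplit1_ne_nil c rest)
        simp [pvSplit1, Ne.symm hx, hss, pvPadHead]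

theorem splitOnMax_single_one (c : Char) (cs : List Char) :
    PySem.Chars.splitOnMax cs [c] 1 = pvSplit1 c cs := by
  unfold PySem.Chars.splitOnMax
  rw [if_neg (by omega)]
  rw [show (1 : Int).toNat = 1 from rfl,
    splitOnMax_go_one c (cs.length + 1) cs [] [] (by omega)]
  simp [pvPadHead_nil]

-- structure of the splitters
theorem pvSplits_eq (c : Char) (cs : List Char) :
    pvSplits c cs = cs.takeWhile (· != c) ::
      (match cs.dropWhile (· != c) with
       | [] => []
       | _ :: r => pvSplits c r) := by
  induction cs with
  | nil => simp [pvSplits]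
  | cons x rest ih =>
    by_cases hx : x = c
    · subst hx; simp [pvSplits, List.takeWhile_cons, List.dropWhile_cons]
    · rw [List.takeWhile_cons_of_pos (by simpa using hx),
        List.dropWhile_cons_of_pos (by simpa using hx)]
      simp only [pvSplits, if_neg hx, ih]

theorem pvSplit1_head (c : Char) (cs : List Char) :
    (pvSplit1 c cs).headD [] = cs.takeWhile (· != c) := by
  induction cs with
  | nil => simp [pvSplit1]
  | cons x rest ih =>
    by_cases hx : x = c
    · subst hx; simp [pvSplit1]
    · rw [List.takeWhile_cons_of_pos (by simpa using hx)]
      simp only [pvSplit1, if_neg hx]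
      obtain ⟨s, ss, hss⟩ := List.exists_cons_of_ne_nil (pvSplit1_ne_nil c rest)
      simp only [hss]
      simpa [hss] using ih

theorem pvSplits_head (c : Char) (cs : List Char) :
    (pvSplits c cs).headD [] = cs.takeWhile (· != c) := by
  rw [pvSplits_eq]; rfl

-- what one '|'-segment contributes to B's match list
def pvSegPair (seg : List Char) : List (List Char × List Char) :=
  if ':' ∈ seg then [(seg.takeWhile (· != ':'), (seg.dropWhile (· != ':')).tail)] else []

theorem pvDrop_takeWhile (p : Char → Bool) (l : List Char) :
    l.drop (l.takeWhile p).length = l.dropWhile p := by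
  induction l with
  | nil => simp
  | cons x rest ih => by_cases h : p x <;> simp [h, ih]

theorem pvDropWhile_head (p : Char → Bool) (l : List Char) (d : Char) (r : List Char)
    (h : l.dropWhile p = d :: r) : p d = false := by
  induction l with
  | nil => simp at h
  | cons x rest ih =>
    by_cases hx : p x
    · exact ih (by simpa [hx] using h)
    · simp [hx] at h
      simp [← h.1, hx]

-- the tail of pvSplits, as a function of the input
def pvTail (c : Char) (cs : List Char) : List (List Char) :=
  match cs.dropWhile (· != c) with
  | [] => []
  | _ :: r => pvSplits c r

theorem pvSplits_struct (c : Char) (cs : List Char) :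
    pvSplits c cs = cs.takeWhile (· != c) :: pvTail c cs := by
  rw [pvSplits_eq]; rfl

theorem pvSplits_cons_of_ne (c x : Char) (rest : List Char) (hx : x ≠ c) :
    pvSplits c (x :: rest) = (x :: rest.takeWhile (· != c)) :: pvTail c rest := by
  obtain ⟨s, ss, hss⟩ := List.exists_cons_of_ne_nil (pvSplits_ne_nil c rest)
  have h2 := pvSplits_struct c rest
  rw [hss] at h2
  injection h2 with h2a h2b
  simp only [pvSplits, if_neg hx, hss, h2a, h2b]

theorem pvScan_bar (rest : List Char) : pvScan ('|' :: rest) = pvScan rest := by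
  rw [pvScan.eq_2]
  have hscrut : (('|' :: rest).takeWhile (fun y => y != '|' && y != ':')).length = 0 := by
    simp
  split
  · rename_i heq
    rw [hscrut, List.drop_zero] at heq
    injection heq with h1 h2
    subst h2
    rw [if_neg (by rw [← h1]; decide)]
  all_goals
    rename_i heq
    rw [hscrut, List.drop_zero] at heq
    try cases heq

theorem pvScan_colon (rest : List Char) :
    pvScan (':' :: rest) = ([], rest.takeWhile (· != '|')) ::
      pvScan ((rest.dropWhile (· != '|')).tail) := by
  rw [pvScan.eq_2]
  have hscrut : ((':' :: rest).takeWhile (fun y => y != '|' && y != ':')).length = 0 := by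
    simp
  split
  · rename_i heq
    rw [hscrut, List.drop_zero] at heq
    injection heq with h1 h2
    subst h2
    rw [if_pos h1.symm]
    simp [pvDrop_takeWhile]
  · rename_i heq
    rw [hscrut, List.drop_zero] at heq
    cases heq

theorem pvScan_other_colon (x : Char) (rest r2 : List Char) (hb : x ≠ '|') (hc : x ≠ ':')
    (h : rest.dropWhile (fun y => y != '|' && y != ':') = ':' :: r2) :
    pvScan (x :: rest) = (x :: rest.takeWhile (fun y => y != '|' && y != ':'),
        r2.takeWhile (· != '|')) :: pvScan ((r2.dropWhile (· != '|')).tail) := by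
  have hg1 : (x :: rest).takeWhile (fun y => y != '|' && y != ':')
      = x :: rest.takeWhile (fun y => y != '|' && y != ':') :=
    List.takeWhile_cons_of_pos (by simp [hb, hc])
  rw [pvScan.eq_2]
  split
  · rename_i heq
    rw [hg1, List.length_cons, List.drop_succ_cons, pvDrop_takeWhile, h] at heq
    injection heq with h1 h2
    subst h2
    rw [if_pos h1.symm]
    simp only [hg1, pvDrop_takeWhile]
  · rename_i heq
    rw [hg1, List.length_cons, List.drop_succ_cons, pvDrop_takeWhile, h] at heq
    cases heq

theorem pvScan_other_bar (x : Char) (rest r2 : List Char) (hb : x ≠ '|') (hc : x ≠ ':')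
    (h : rest.dropWhile (fun y => y != '|' && y != ':') = '|' :: r2) :
    pvScan (x :: rest) = pvScan r2 := by
  have hg1 : (x :: rest).takeWhile (fun y => y != '|' && y != ':')
      = x :: rest.takeWhile (fun y => y != '|' && y != ':') :=
    List.takeWhile_cons_of_pos (by simp [hb, hc])
  rw [pvScan.eq_2]
  split
  · rename_i heq
    rw [hg1, List.length_cons, List.drop_succ_cons, pvDrop_takeWhile, h] at heq
    injection heq with h1 h2
    subst h2
    rw [if_neg (by rw [← h1]; decide)]
  · rename_i heq
    rw [hg1, List.length_cons, List.drop_succ_cons, pvDrop_takeWhile, h] at heq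
    cases heq

theorem pvScan_other_end (x : Char) (rest : List Char) (hb : x ≠ '|') (hc : x ≠ ':')
    (h : rest.dropWhile (fun y => y != '|' && y != ':') = []) :
    pvScan (x :: rest) = [] := by
  have hg1 : (x :: rest).takeWhile (fun y => y != '|' && y != ':')
      = x :: rest.takeWhile (fun y => y != '|' && y != ':') :=
    List.takeWhile_cons_of_pos (by simp [hb, hc])
  rw [pvScan.eq_2]
  split
  · rename_i heq
    rw [hg1, List.length_cons, List.drop_succ_cons, pvDrop_takeWhile, h] at heq
    cases heq
  · rfl

theorem pvScan_eq (cs : List Char) :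
    pvScan cs = (pvSplits '|' cs).flatMap pvSegPair := by
  have main : ∀ (n : Nat) (cs : List Char), cs.length ≤ n →
      pvScan cs = (pvSplits '|' cs).flatMap pvSegPair := by
    intro n
    induction n with
    | zero =>
      intro cs hlen
      have hnil : cs = [] := List.length_eq_zero_iff.mp (by omega)
      subst hnil
      simp [pvScan, pvSplits, pvSegPair]
    | succ n ih =>
      intro cs hlen
      -- step over the remainder after the '|' that ends a match (or the end of the line)
      have tailstep : ∀ (u : List Char), u.length ≤ n →
          pvScan ((u.dropWhile (· != '|')).tail) = (pvTail '|' u).flatMap pvSegPair := by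
        intro u hu
        unfold pvTail
        cases hdw : u.dropWhile (· != '|') with
        | nil => simp [pvScan]
        | cons d r =>
          rw [List.tail_cons]
          apply ih
          have hlen2 := congrArg List.length hdw
          have hle := List.length_dropWhile_le (· != '|') u
          simp only [List.length_cons] at hlen2
          omega
      cases cs with
      | nil => simp [pvScan, pvSplits, pvSegPair]
      | cons x rest =>
        simp only [List.length_cons] at hlen
        by_cases hb : x = '|'
        · subst hb
          rw [pvScan_bar, ih rest (by omega)]
          simp [pvSplits, pvSegPair]
        by_cases hc : x = ':'
        · subst hc
          rw [pvScan_colon, pvSplits_cons_of_ne _ _ _ (by decide)]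
          have hseg : pvSegPair (':' :: rest.takeWhile (· != '|'))
              = [([], rest.takeWhile (· != '|'))] := by
            simp [pvSegPair]
          rw [List.flatMap_cons, hseg, tailstep rest (by omega), List.singleton_append]
        · -- x is an ordinary char: look at what ends the [^|:]* run
          cases hd : rest.dropWhile (fun y => y != '|' && y != ':') with
          | cons d r2 =>
            have hrest : rest = rest.takeWhile (fun y => y != '|' && y != ':') ++ d :: r2 := by
              rw [← hd, List.takeWhile_append_dropWhile]
            have hmem : ∀ y ∈ rest.takeWhile (fun y => y != '|' && y != ':'),
                y ≠ '|' ∧ y ≠ ':' := by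
              intro y hy
              have := List.mem_takeWhile_imp hy
              simpa using this
            have hlenr2 : r2.length + 1 ≤ rest.length := by
              have := congrArg List.length hrest
              simp only [List.length_append, List.length_cons] at this
              omega
            by_cases hdc : d = ':'
            · subst hdc
              rw [pvScan_other_colon x rest r2 hb hc hd,
                pvSplits_cons_of_ne _ _ _ hb]
              have hs : rest.takeWhile (· != '|')
                  = rest.takeWhile (fun y => y != '|' && y != ':')
                      ++ ':' :: r2.takeWhile (· != '|') := by
                conv_lhs => rw [hrest]
                rw [List.takeWhile_append_of_pos (by intro y hy; simp [(hmem y hy).1]),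
                  List.takeWhile_cons_of_pos (by decide)]
              have hdrop : rest.dropWhile (· != '|') = r2.dropWhile (· != '|') := by
                conv_lhs => rw [hrest]
                rw [List.dropWhile_append_of_pos (by intro y hy; simp [(hmem y hy).1]),
                  List.dropWhile_cons_of_pos (by decide)]
              have hseg : pvSegPair (x :: rest.takeWhile (· != '|'))
                  = [(x :: rest.takeWhile (fun y => y != '|' && y != ':'),
                      r2.takeWhile (· != '|'))] := by
                rw [pvSegPair, if_pos (by rw [hs]; simp)]
                rw [hs, List.takeWhile_cons_of_pos (by simp [hc]),
                  List.takeWhile_append_of_pos (by intro y hy; simp [(hmem y hy).2]),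
                  List.takeWhile_cons_of_neg (by decide),
                  List.dropWhile_cons_of_pos (by simp [hc]),
                  List.dropWhile_append_of_pos (by intro y hy; simp [(hmem y hy).2]),
                  List.dropWhile_cons_of_neg (by decide)]
                simp
              rw [List.flatMap_cons, hseg]
              have htl : pvTail '|' rest = pvTail '|' r2 := by
                unfold pvTail; rw [hdrop]
              rw [htl, ← tailstep r2 (by omega), List.singleton_append]
            · -- the run ends at a '|': the attempt fails, resume after that '|'
              have hdb : d = '|' := by
                have := pvDropWhile_head _ _ _ _ hd
                simp [hdc] at this
                exact this
              subst hdb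
              rw [pvScan_other_bar x rest r2 hb hc hd,
                ih r2 (by omega), pvSplits_cons_of_ne _ _ _ hb]
              have hs : rest.takeWhile (· != '|')
                  = rest.takeWhile (fun y => y != '|' && y != ':') := by
                conv_lhs => rw [hrest]
                rw [List.takeWhile_append_of_pos (by intro y hy; simp [(hmem y hy).1]),
                  List.takeWhile_cons_of_neg (by decide)]
                simp
              have hnc : ':' ∉ rest.takeWhile (· != '|') := by
                rw [hs]; intro hmm; exact absurd rfl (hmem _ hmm).2
              have h1 : pvSegPair (x :: rest.takeWhile (· != '|')) = [] := by
                simp [pvSegPair, hnc]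
                exact fun h => hc h.symm
              have htl : pvTail '|' rest = pvSplits '|' r2 := by
                unfold pvTail
                rw [show rest.dropWhile (· != '|') = '|' :: r2 by
                  conv_lhs => rw [hrest]
                  rw [List.dropWhile_append_of_pos (by intro y hy; simp [(hmem y hy).1]),
                    List.dropWhile_cons_of_neg (by decide)]]
              rw [List.flatMap_cons, h1, List.nil_append, htl]
          | nil =>
            -- neither '|' nor ':' anywhere in rest
            have hrest : rest = rest.takeWhile (fun y => y != '|' && y != ':') := by
              conv_lhs => rw [← List.takeWhile_append_dropWhile
                (p := fun y => y != '|' && y != ':') (l := rest), hd]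
              simp
            have hmem : ∀ y ∈ rest, y ≠ '|' ∧ y ≠ ':' := by
              intro y hy
              rw [hrest] at hy
              have := List.mem_takeWhile_imp hy
              simpa using this
            rw [pvScan_other_end x rest hb hc hd, pvSplits_cons_of_ne _ _ _ hb]
            have hs : rest.takeWhile (· != '|') = rest :=
              List.takeWhile_eq_self_iff.mpr (by intro y hy; simp [(hmem y hy).1])
            have hnc : ':' ∉ rest.takeWhile (· != '|') := by
              rw [hs]; intro hmm; exact absurd rfl (hmem _ hmm).2
            have h1 : pvSegPair (x :: rest.takeWhile (· != '|')) = [] := by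
              simp [pvSegPair, hnc]
              exact fun h => hc h.symm
            have htl : pvTail '|' rest = [] := by
              unfold pvTail
              rw [show rest.dropWhile (· != '|') = [] from
                List.dropWhile_eq_nil_iff.mpr (by intro y hy; simp [(hmem y hy).1])]
            rw [List.flatMap_cons, h1, List.nil_append, htl]
            rfl
  exact main cs.length cs le_rfl

-- ---------- whitespace / strip lemmas ----------

theorem pvDropWhile_append_nonstop (p : Char → Bool) (u v : List Char) (y : Char)
    (hy : p y = false) :
    (u ++ y :: v).dropWhile p = u.dropWhile p ++ y :: v := by
  induction u with
  | nil => simp [List.dropWhile_cons, hy]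
  | cons a u ih =>
    by_cases ha : p a
    · simpa [List.dropWhile_cons, ha] using ih
    · simp [List.dropWhile_cons, ha]

theorem pvLstrip_spaces (w : List Char) (hw : ∀ c ∈ w, PySem.Chars.isspace c = true) :
    PySem.Chars.lstrip w = [] := by
  unfold PySem.Chars.lstrip
  exact List.dropWhile_eq_nil_iff.mpr (by intro x hx; exact hw x hx)

theorem pvStrip_space_prefix (w xs : List Char) (hw : ∀ c ∈ w, PySem.Chars.isspace c = true) :
    PySem.Chars.strip (w ++ xs) = PySem.Chars.strip xs := by
  unfold PySem.Chars.strip PySem.Chars.lstrip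
  rw [List.dropWhile_append_of_pos (by intro y hy; exact hw y hy)]

theorem pvRstrip_space_suffix (xs w : List Char) (hw : ∀ c ∈ w, PySem.Chars.isspace c = true) :
    PySem.Chars.rstrip (xs ++ w) = PySem.Chars.rstrip xs := by
  unfold PySem.Chars.rstrip
  rw [List.reverse_append, List.dropWhile_append_of_pos (by simpa using hw)]

theorem pvStrip_space_suffix (xs w : List Char) (hw : ∀ c ∈ w, PySem.Chars.isspace c = true) :
    PySem.Chars.strip (xs ++ w) = PySem.Chars.strip xs := by
  unfold PySem.Chars.strip
  rcases hns : PySem.Chars.lstrip xs with _ | ⟨d, r⟩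
  · have hxs : ∀ c ∈ xs, PySem.Chars.isspace c = true := by
      intro c hc
      have := List.dropWhile_eq_nil_iff.mp hns c hc
      exact this
    rw [pvLstrip_spaces (xs ++ w) (by intro c hc; rcases List.mem_append.mp hc with h | h
                                      exacts [hxs c h, hw c h])]
  · have hl : PySem.Chars.lstrip (xs ++ w) = PySem.Chars.lstrip xs ++ w := by
      unfold PySem.Chars.lstrip at hns ⊢
      rw [List.dropWhile_append, hns]
      simp
    rw [hl, hns, pvRstrip_space_suffix _ _ hw]

theorem pvRstrip_decomp (b : List Char) :
    ∃ w, (∀ c ∈ w, PySem.Chars.isspace c = true) ∧ b = PySem.Chars.rstrip b ++ w := by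
  refine ⟨(b.reverse.takeWhile PySem.Chars.isspace).reverse, ?_, ?_⟩
  · intro c hc
    exact List.mem_takeWhile_imp (List.mem_reverse.mp hc)
  · unfold PySem.Chars.rstrip
    conv_lhs => rw [← List.reverse_reverse b,
      ← List.takeWhile_append_dropWhile (p := PySem.Chars.isspace) (l := b.reverse)]
    rw [List.reverse_append]

theorem pvStrip_decomp (xs : List Char) :
    ∃ w1 w2, (∀ c ∈ w1, PySem.Chars.isspace c = true) ∧ (∀ c ∈ w2, PySem.Chars.isspace c = true) ∧
      xs = w1 ++ PySem.Chars.strip xs ++ w2 := by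
  obtain ⟨w2, hw2, hb⟩ := pvRstrip_decomp (PySem.Chars.lstrip xs)
  refine ⟨xs.takeWhile PySem.Chars.isspace, w2, ?_, hw2, ?_⟩
  · intro c hc; exact List.mem_takeWhile_imp hc
  · conv_lhs => rw [← List.takeWhile_append_dropWhile (p := PySem.Chars.isspace) (l := xs)]
    unfold PySem.Chars.strip
    rw [List.append_assoc, ← hb]
    rfl

theorem pvStrip_lstrip (a : List Char) :
    PySem.Chars.strip (PySem.Chars.lstrip a) = PySem.Chars.strip a := by
  conv_rhs => rw [← List.takeWhile_append_dropWhile (p := PySem.Chars.isspace) (l := a)]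
  rw [pvStrip_space_prefix _ _ (by intro c hc; exact List.mem_takeWhile_imp hc)]
  rfl

theorem pvStrip_rstrip (b : List Char) :
    PySem.Chars.strip (PySem.Chars.rstrip b) = PySem.Chars.strip b := by
  obtain ⟨w, hw, hb⟩ := pvRstrip_decomp b
  conv_rhs => rw [hb]
  rw [pvStrip_space_suffix _ _ hw]

theorem pvMem_strip (c : Char) (hc : PySem.Chars.isspace c = false) (xs : List Char) :
    c ∈ PySem.Chars.strip xs ↔ c ∈ xs := by
  obtain ⟨w1, w2, h1, h2, hx⟩ := pvStrip_decomp xs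
  constructor
  · intro h; rw [hx]; simp [h]
  · intro h
    rw [hx] at h
    simp only [List.mem_append] at h
    rcases h with (h | h) | h
    · rw [h1 c h] at hc; cases hc
    · exact h
    · rw [h2 c h] at hc; cases hc

-- ---------- per-segment lemmas ----------

theorem pvDropWhile_mem (c : Char) (p : List Char) (hm : c ∈ p) :
    p.dropWhile (· != c) = c :: (p.dropWhile (· != c)).tail := by
  cases hdw : p.dropWhile (· != c) with
  | nil =>
    have := List.dropWhile_eq_nil_iff.mp hdw c hm
    simp at this
  | cons d r =>
    have hd := pvDropWhile_head _ _ _ _ hdw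
    simp only [bne_eq_false_iff_eq] at hd
    subst hd
    rfl

theorem pvLstrip_append_colon (a b : List Char) :
    PySem.Chars.lstrip (a ++ ':' :: b) = PySem.Chars.lstrip a ++ ':' :: b := by
  unfold PySem.Chars.lstrip
  exact pvDropWhile_append_nonstop _ a b ':' (by decide)

theorem pvRstrip_append_colon (u b : List Char) :
    PySem.Chars.rstrip (u ++ ':' :: b) = u ++ ':' :: PySem.Chars.rstrip b := by
  unfold PySem.Chars.rstrip
  rw [List.reverse_append, List.reverse_cons, List.append_assoc, List.singleton_append,
    pvDropWhile_append_nonstop _ _ _ ':' (by decide)]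
  simp

theorem pvStrip_colon_decomp (seg : List Char) (hm : ':' ∈ seg) :
    PySem.Chars.strip seg
      = PySem.Chars.lstrip (seg.takeWhile (· != ':'))
          ++ ':' :: PySem.Chars.rstrip ((seg.dropWhile (· != ':')).tail) := by
  conv_lhs => rw [← List.takeWhile_append_dropWhile (p := (· != ':')) (l := seg),
    pvDropWhile_mem ':' seg hm]
  unfold PySem.Chars.strip
  rw [pvLstrip_append_colon, pvRstrip_append_colon]

theorem pvNoColon_takeWhile (seg : List Char) : ':' ∉ seg.takeWhile (· != ':') := by
  intro h
  have := List.mem_takeWhile_imp h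
  simp at this

theorem pvNoColon_lstrip_takeWhile (seg : List Char) :
    ':' ∉ PySem.Chars.lstrip (seg.takeWhile (· != ':')) := by
  intro h
  exact pvNoColon_takeWhile seg ((List.dropWhile_sublist _).subset h)

theorem pvP1 (seg : List Char) (hm : ':' ∈ seg) :
    PySem.Chars.strip ((PySem.Chars.strip seg).takeWhile (· != ':'))
      = PySem.Chars.strip (seg.takeWhile (· != ':')) := by
  rw [pvStrip_colon_decomp seg hm,
    List.takeWhile_append_of_pos (by
      intro y hy
      have : y ≠ ':' := fun he => pvNoColon_lstrip_takeWhile seg (he ▸ hy)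
      simp [this]),
    List.takeWhile_cons_of_neg (by decide), List.append_nil]
  exact pvStrip_lstrip _

theorem pvP2 (seg : List Char) (hm : ':' ∈ seg) :
    PySem.Chars.strip (((PySem.Chars.strip seg).dropWhile (· != ':')).tail)
      = PySem.Chars.strip ((seg.dropWhile (· != ':')).tail) := by
  rw [pvStrip_colon_decomp seg hm,
    List.dropWhile_append_of_pos (by
      intro y hy
      have : y ≠ ':' := fun he => pvNoColon_lstrip_takeWhile seg (he ▸ hy)
      simp [this]),
    List.dropWhile_cons_of_neg (by decide), List.tail_cons]
  exact pvStrip_rstrip _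

theorem pvIsIn_colon (p : List Char) : PySem.Chars.isIn [':'] p = true ↔ ':' ∈ p := by
  rw [PySem.Chars.isIn_iff_infix]
  constructor
  · intro ⟨u, v, huv⟩
    rw [← huv]; simp
  · intro hm
    obtain ⟨u, v, huv⟩ := List.append_of_mem hm
    exact ⟨u, v, by rw [huv]; simp⟩

theorem pvSplit1_struct (c : Char) (cs : List Char) :
    pvSplit1 c cs = cs.takeWhile (· != c) ::
      (match cs.dropWhile (· != c) with
       | [] => []
       | _ :: r => [r]) := by
  induction cs with
  | nil => simp [pvSplit1]
  | cons x rest ih =>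
    by_cases hx : x = c
    · subst hx; simp [pvSplit1]
    · rw [List.takeWhile_cons_of_pos (by simpa using hx),
        List.dropWhile_cons_of_pos (by simpa using hx)]
      simp only [pvSplit1, if_neg hx, ih]

theorem pvSplit1_of_mem (p : List Char) (hm : ':' ∈ p) :
    pvSplit1 ':' p = [p.takeWhile (· != ':'), (p.dropWhile (· != ':')).tail] := by
  conv_lhs => rw [pvSplit1_struct, pvDropWhile_mem ':' p hm]

theorem pvFlatMap_segPair (M : List (List Char)) :
    M.flatMap pvSegPair
      = (M.filter (fun seg => decide (':' ∈ seg))).map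
          (fun seg => (seg.takeWhile (· != ':'), (seg.dropWhile (· != ':')).tail)) := by
  induction M with
  | nil => rfl
  | cons seg M ih =>
    by_cases hm : ':' ∈ seg
    · simp [pvSegPair, hm, ih]
    · simp [pvSegPair, hm, ih]

-- ---------- relating the splits of the line and of the stripped line ----------

-- "u is v padded with whitespace on both sides"
def pvRel (u v : List Char) : Prop :=
  ∃ w1 w2, (∀ c ∈ w1, PySem.Chars.isspace c = true) ∧ (∀ c ∈ w2, PySem.Chars.isspace c = true) ∧
    u = w1 ++ v ++ w2

theorem pvRel_refl (u : List Char) : pvRel u u :=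
  ⟨[], [], by simp, by simp, by simp⟩

theorem pvRel_strip (u v : List Char) (h : pvRel u v) :
    PySem.Chars.strip u = PySem.Chars.strip v := by
  obtain ⟨w1, w2, h1, h2, he⟩ := h
  rw [he, List.append_assoc, pvStrip_space_prefix _ _ h1, pvStrip_space_suffix _ _ h2]

theorem pvRel_memColon (u v : List Char) (h : pvRel u v) : ':' ∈ u ↔ ':' ∈ v := by
  obtain ⟨w1, w2, h1, h2, he⟩ := h
  subst he
  simp only [List.mem_append]
  constructor
  · rintro ((hc | hc) | hc)
    · exact absurd (h1 _ hc) (by decide)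
    · exact hc
    · exact absurd (h2 _ hc) (by decide)
  · intro hc; exact Or.inl (Or.inr hc)

def pvPadLast (w : List Char) : List (List Char) → List (List Char)
  | [] => []
  | [s] => [s ++ w]
  | s :: ss => s :: pvPadLast w ss

theorem pvSplits_cons_eq_sep (c : Char) (rest : List Char) :
    pvSplits c (c :: rest) = [] :: pvSplits c rest := by
  simp [pvSplits]

theorem pvSplits_no_sep (c : Char) (w : List Char) (hw : ∀ x ∈ w, x ≠ c) :
    pvSplits c w = [w] := by
  induction w with
  | nil => rfl
  | cons a w ih =>
    have ha : a ≠ c := hw a (by simp)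
    rw [pvSplits, if_neg ha, ih (fun x hx => hw x (by simp [hx]))]

theorem pvSplits_space_prefix (c : Char) (w ys : List Char) (hw : ∀ x ∈ w, x ≠ c) :
    pvSplits c (w ++ ys) = pvPadHead w (pvSplits c ys) := by
  induction w with
  | nil => rw [List.nil_append, pvPadHead_nil]
  | cons a w ih =>
    have ha : a ≠ c := hw a (by simp)
    obtain ⟨s0, ss0, h0⟩ := List.exists_cons_of_ne_nil (pvSplits_ne_nil c ys)
    rw [List.cons_append, pvSplits, if_neg ha, ih (fun x hx => hw x (by simp [hx])), h0]
    simp [pvPadHead]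

theorem pvSplits_space_suffix (c : Char) (ys w : List Char) (hw : ∀ x ∈ w, x ≠ c) :
    pvSplits c (ys ++ w) = pvPadLast w (pvSplits c ys) := by
  induction ys with
  | nil => rw [List.nil_append, pvSplits_no_sep c w hw]; rfl
  | cons y ys ih =>
    obtain ⟨s, ss, hss⟩ := List.exists_cons_of_ne_nil (pvSplits_ne_nil c ys)
    by_cases hy : y = c
    · subst hy
      rw [List.cons_append, pvSplits_cons_eq_sep, pvSplits_cons_eq_sep, ih, hss]
      cases ss <;> rfl
    · rw [List.cons_append, pvSplits, if_neg hy, ih, pvSplits, if_neg hy, hss]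
      cases ss with
      | nil => simp [pvPadLast]
      | cons s2 ss2 => simp [pvPadLast]

theorem pvPadLast_forall2 (w : List Char) (hw : ∀ c ∈ w, PySem.Chars.isspace c = true)
    (V : List (List Char)) : List.Forall₂ pvRel (pvPadLast w V) V := by
  induction V with
  | nil => exact List.Forall₂.nil
  | cons s ss ih =>
    cases ss with
    | nil =>
      exact List.Forall₂.cons ⟨[], w, by simp, hw, by simp⟩ List.Forall₂.nil
    | cons s2 ss2 =>
      exact List.Forall₂.cons (pvRel_refl s) ih

theorem pvSpace_ne_bar (x : Char) (h : PySem.Chars.isspace x = true) : x ≠ '|' := by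
  intro he; subst he; simp [PySem.Chars.isspace] at h

theorem pvRel_splits (line : List Char) :
    List.Forall₂ pvRel (pvSplits '|' line) (pvSplits '|' (PySem.Chars.strip line)) := by
  obtain ⟨w1, w2, h1, h2, he⟩ := pvStrip_decomp line
  conv_lhs => rw [he]
  rw [List.append_assoc,
    pvSplits_space_prefix '|' w1 _ (fun x hx => pvSpace_ne_bar x (h1 x hx)),
    pvSplits_space_suffix '|' _ w2 (fun x hx => pvSpace_ne_bar x (h2 x hx))]
  obtain ⟨s, ss, hss⟩ := List.exists_cons_of_ne_nil (pvSplits_ne_nil '|' (PySem.Chars.strip line))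
  rw [hss]
  cases ss with
  | nil =>
    exact List.Forall₂.cons ⟨w1, w2, h1, h2, by simp [pvPadLast, pvPadHead]⟩ List.Forall₂.nil
  | cons s2 ss2 =>
    exact List.Forall₂.cons ⟨w1, [], h1, by simp, by simp [pvPadLast, pvPadHead]⟩
      (pvPadLast_forall2 w2 h2 (s2 :: ss2))

-- ---------- putting the two ports in a common normal form ----------

-- the value a colon-containing segment contributes (key and value, stripped)
def pvF (p : List Char) : String × String :=
  (String.ofList (PySem.Chars.strip (p.takeWhile (· != ':'))),
   String.ofList (PySem.Chars.strip ((p.dropWhile (· != ':')).tail)))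

theorem pvF_strip (seg : List Char) (hm : ':' ∈ seg) :
    pvF (PySem.Chars.strip seg) = pvF seg := by
  unfold pvF
  rw [pvP1 seg hm, pvP2 seg hm]

theorem pvPortB_eq (s : String) (hs : ¬ s = "") :
    parse_historial_alt s
      = ((pvSplits '|' (s.toList.takeWhile (· != '\n'))).filter
          (fun seg => decide (':' ∈ seg))).map pvF := by
  rw [parse_historial_alt, if_neg hs]
  simp only [splitOnMax_single_one, pvSplit1_head, pvScan_eq, pvFlatMap_segPair, List.map_map]
  rfl

theorem pvBody_eq (out : List (String × String)) (p : List Char) :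
    (if PySem.Chars.isIn [':'] p then
        match PySem.Chars.splitOnMax p [':'] 1 with
        | [mes, niv] =>
            out ++ [(String.ofList (PySem.Chars.strip mes), String.ofList (PySem.Chars.strip niv))]
        | _ => out
      else out)
    = (if PySem.Chars.isIn [':'] p then out ++ [pvF p] else out) := by
  by_cases hi : PySem.Chars.isIn [':'] p
  · have hm : ':' ∈ p := (pvIsIn_colon p).mp hi
    rw [if_pos hi, if_pos hi, splitOnMax_single_one, pvSplit1_of_mem p hm]
    rfl
  · rw [if_neg hi, if_neg hi]

theorem pvPortA_eq (s : String) (hs : ¬ s = "") :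
    parse_historial s
      = ((pvSplits '|' (PySem.Chars.strip (s.toList.takeWhile (· != '\n')))).filter
          (fun x => PySem.Chars.isIn [':'] x)).map (fun x => pvF (PySem.Chars.strip x)) := by
  rw [parse_historial, if_neg hs]
  simp only [splitOn_single, pvSplits_head]
  have hfun : (fun (out : List (String × String)) (p : List Char) =>
      if PySem.Chars.isIn [':'] p then
        match PySem.Chars.splitOnMax p [':'] 1 with
        | [mes, niv] =>
            out ++ [(String.ofList (PySem.Chars.strip mes), String.ofList (PySem.Chars.strip niv))]
        | _ => out
      else out)
      = (fun out p => if PySem.Chars.isIn [':'] p then out ++ [pvF p] else out) := by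
    funext out p
    exact pvBody_eq out p
  rw [hfun]
  rw [PySem.List.foldl_append_if, List.nil_append, List.filter_map, List.filter_filter]
  rw [List.filter_congr (q := fun x => PySem.Chars.isIn [':'] (PySem.Chars.strip x)) (by
    intro x _
    by_cases hc : PySem.Chars.isIn [':'] (PySem.Chars.strip x)
    · have hm : ':' ∈ PySem.Chars.strip x := (pvIsIn_colon _).mp hc
      have hne : (PySem.Chars.strip x).isEmpty = false := by
        cases hsx : PySem.Chars.strip x with
        | nil => rw [hsx] at hm; cases hm
        | cons a b => rfl
      simp [Function.comp, hc, hne]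
    · simp [Function.comp, hc])]
  rw [List.filter_congr (q := fun x => PySem.Chars.isIn [':'] x) (by
    intro x _
    have : (PySem.Chars.isIn [':'] (PySem.Chars.strip x) = true)
        ↔ (PySem.Chars.isIn [':'] x = true) := by
      rw [pvIsIn_colon, pvIsIn_colon]
      exact pvMem_strip ':' (by decide) x
    show PySem.Chars.isIn [':'] (PySem.Chars.strip x) = PySem.Chars.isIn [':'] x
    exact Bool.eq_iff_iff.mpr this)]
  rw [List.map_map]
  rfl

theorem pvFinal : ∀ (M L : List (List Char)), List.Forall₂ pvRel M L →
    (M.filter (fun seg => decide (':' ∈ seg))).map pvF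
      = (L.filter (fun x => PySem.Chars.isIn [':'] x)).map (fun x => pvF (PySem.Chars.strip x)) := by
  intro M L h
  induction h with
  | nil => rfl
  | cons huv htail ih =>
    rename_i u v M' L'
    by_cases hm : ':' ∈ u
    · have hmv : ':' ∈ v := (pvRel_memColon _ _ huv).mp hm
      rw [List.filter_cons_of_pos (by simpa using hm),
        List.filter_cons_of_pos (by simpa using (pvIsIn_colon v).mpr hmv),
        List.map_cons, List.map_cons, ih]
      congr 1
      rw [← pvRel_strip u v huv, pvF_strip u hm]
    · have hmv : ¬ ':' ∈ v := fun hv => hm ((pvRel_memColon _ _ huv).mpr hv)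
      rw [List.filter_cons_of_neg (by simpa using hm),
        List.filter_cons_of_neg (by simp [pvIsIn_colon v, hmv]), ih]

theorem parse_historial_spec : Claim_equal_parse_historial := by
  intro s _
  unfold Spec_parse_historial
  by_cases hs : s = ""
  · subst hs
    rfl
  · rw [pvPortA_eq s hs, pvPortB_eq s hs]
    exact (pvFinal _ _ (pvRel_splits (s.toList.takeWhile (· != '\n')))).symm
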